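-- pv_equiv track=rewrite | github.com/openzz-ai/obsidian-ai-stack | scripts/vault-frontmatter.py | match_dir_prefix
-- ===== SOURCE A (Python) =====
-- def match_dir_prefix(reldir: str, mapping: dict) -> str | list | None:
--     """最长前缀匹配目录映射。"""
--     best_match = None
--     best_len = -1
--     for prefix, value in mapping.items():
--         if reldir == prefix or reldir.startswith(prefix + "/"):
--             if len(prefix) > best_len:
--                 best_match = value
--                 best_len = len(prefix)
--         elif prefix == "." and reldir == "":
--             if best_len < 0:
--                 best_match = value
--                 best_len = 0
--     return best_match
-- ===== SOURCE B (Python) =====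
-- def match_dir_prefix(reldir: str, mapping: dict) -> str | list | None:
--     """最长前缀匹配目录映射。
--
--     Walks reldir's ancestor prefixes from longest to shortest (cutting at the
--     last "/" each time) and returns the first one present in the mapping,
--     instead of scanning every mapping key.
--     """
--     if reldir == "":
--         for k, v in mapping.items():
--             if k in ("", "."):
--                 return v
--         return None
--     c = reldir
--     while True:
--         if c in mapping:
--             return mapping[c]
--         i = c.rfind("/")
--         if i < 0:
--             return None
--         c = c[:i]
-- ===== Notes on version B (the rewrite author's own statement) =====
-- stated objective: faster
-- what changed: Instead of scanning every mapping key and keeping a running longest match, B enumerates the ancestor prefixes of reldir from longest to shortest and returns the first one present via a dict lookup (the empty reldir case reduces to finding the first of the keys '' or '.').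
import Mathlib
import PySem

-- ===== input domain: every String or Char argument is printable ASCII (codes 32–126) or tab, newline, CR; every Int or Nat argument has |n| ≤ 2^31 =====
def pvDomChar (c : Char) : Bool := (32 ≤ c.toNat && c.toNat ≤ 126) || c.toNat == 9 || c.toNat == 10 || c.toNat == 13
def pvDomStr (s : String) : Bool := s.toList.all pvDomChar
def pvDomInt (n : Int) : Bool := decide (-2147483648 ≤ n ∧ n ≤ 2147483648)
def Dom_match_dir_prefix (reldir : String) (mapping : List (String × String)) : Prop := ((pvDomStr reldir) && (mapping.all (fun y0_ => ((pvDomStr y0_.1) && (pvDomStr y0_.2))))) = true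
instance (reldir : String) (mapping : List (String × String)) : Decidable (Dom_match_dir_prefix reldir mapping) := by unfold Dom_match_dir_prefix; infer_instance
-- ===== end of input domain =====

-- B replaces A's scan over every mapping key by a walk over reldir's own ancestor prefixes,
-- longest first, each looked up directly; same return value, asymptotically fewer key tests.

-- ===== PORT A =====
-- one iteration of A's for-loop; state = (best_match, best_len)
def matchAStep (reldir : String) (st : Option String × Int) (kv : String × String) : Option String × Int :=
  if reldir == kv.1 || PySem.Str.startswith reldir (kv.1 ++ "/") then
    if PySem.Str.len kv.1 > st.2 then (some kv.2, PySem.Str.len kv.1) else st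
  else if kv.1 == "." && reldir == "" then
    if st.2 < 0 then (some kv.2, 0) else st
  else st

def match_dir_prefix (reldir : String) (mapping : List (String × String)) : Option String :=
  (mapping.foldl (matchAStep reldir) (none, -1)).1

-- ===== PORT B =====
-- first value whose key is "" or "." (B's loop for reldir == "")
def rootLookup : List (String × String) → Option String
  | [] => none
  | kv :: t => if kv.1 == "" || kv.1 == "." then some kv.2 else rootLookup t

-- dict lookup on the association list (first match), = `c in mapping` / `mapping[c]`
def assocFirst : List (String × String) → String → Option String
  | [], _ => none
  | kv :: t, c => if kv.1 == c then some kv.2 else assocFirst t c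

-- rfind facts the port's termination proof cites (rfind.go scans indices j, j-1, …, 0)
theorem rfind_go_bounds (s sub : List Char) (j : Nat) :
    PySem.Chars.rfind.go s sub j = -1 ∨
      (0 ≤ PySem.Chars.rfind.go s sub j ∧ (PySem.Chars.rfind.go s sub j).toNat ≤ j ∧
        sub.isPrefixOf (s.drop (PySem.Chars.rfind.go s sub j).toNat) = true) := by
  induction j with
  | zero =>
    by_cases h : sub.isPrefixOf s = true <;> simp [PySem.Chars.rfind.go, h]
  | succ j ih =>
    by_cases h : sub.isPrefixOf (s.drop (j + 1)) = true
    · right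
      simp [PySem.Chars.rfind.go, h]
      omega
    · rw [show PySem.Chars.rfind.go s sub (j + 1) = PySem.Chars.rfind.go s sub j from by
        simp [PySem.Chars.rfind.go, h]]
      rcases ih with h' | ⟨h1, h2, h3⟩
      · exact Or.inl h'
      · exact Or.inr ⟨h1, by omega, h3⟩

theorem rfind_slash_eq (c : String) :
    PySem.Str.rfind c "/" = PySem.Chars.rfind.go c.toList ['/'] c.toList.length := by
  rw [PySem.Str.rfind_eq]; rfl

theorem rfind_slash_lt (c : String) (h : ¬ PySem.Str.rfind c "/" < 0) :
    (PySem.Str.rfind c "/").toNat < c.toList.length := by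
  rw [rfind_slash_eq] at h ⊢
  rcases rfind_go_bounds c.toList ['/'] c.toList.length with h' | ⟨_, _, h3⟩
  · omega
  · have := (List.isPrefixOf_iff_prefix.mp h3).length_le
    simp only [List.length_cons, List.length_nil, List.length_drop] at this
    omega

theorem toList_sliceI (s : String) (i : Int) (h : 0 ≤ i) :
    (PySem.Str.slice s none (some i)).toList = s.toList.take i.toNat := by
  simp only [PySem.Str.toList_slice, PySem.Chars.slice_eq_listSlice, PySem.List.slice_to s.toList h]

-- B's while-loop: try the current prefix, then cut at the last "/" (Python binds
-- i = c.rfind("/") once; the port repeats the same pure call)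
def bLoop (mapping : List (String × String)) (c : String) : Option String :=
  match assocFirst mapping c with
  | some v => some v
  | none =>
    if h : PySem.Str.rfind c "/" < 0 then none
    else bLoop mapping (PySem.Str.slice c none (some (PySem.Str.rfind c "/")))
termination_by c.toList.length
decreasing_by
  rw [toList_sliceI c _ (by omega), List.length_take]
  have := rfind_slash_lt c h
  omega

def match_dir_prefix_alt (reldir : String) (mapping : List (String × String)) : Option String :=
  if reldir == "" then rootLookup mapping
  else bLoop mapping reldir

-- ===== PRECONDITION & SPEC =====
def Spec_match_dir_prefix (reldir : String) (mapping : List (String × String)) (out : Option String) : Prop := out = match_dir_prefix_alt reldir mapping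
instance (reldir : String) (mapping : List (String × String)) (out : Option String) : Decidable (Spec_match_dir_prefix reldir mapping out) := by unfold Spec_match_dir_prefix; infer_instance

-- ===== CLAIM (what is proved, stated in full; the proofs are below) =====
def Claim_equal_match_dir_prefix : Prop := ∀ (reldir : String) (mapping : List (String × String)), Dom_match_dir_prefix reldir mapping → Spec_match_dir_prefix reldir mapping (match_dir_prefix reldir mapping)

-- ===== LEMMAS AND PROOFS =====

-- A's match test for a key (the loop's first condition)
def mTest (reldir p : String) : Bool :=
  reldir == p || PySem.Str.startswith reldir (p ++ "/")

-- first entry of maximal matching-key length, with that length (-1 = nothing matched)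
def mbest (reldir : String) : List (String × String) → Option String × Int
  | [] => (none, -1)
  | kv :: t =>
    let r := mbest reldir t
    if mTest reldir kv.1 && decide (r.2 ≤ PySem.Str.len kv.1) then (some kv.2, PySem.Str.len kv.1) else r

theorem len_nonneg (p : String) : 0 ≤ PySem.Str.len p := by
  rw [PySem.Str.len_eq]; positivity

theorem mTest_iff (reldir p : String) :
    mTest reldir p = true ↔ p.toList = reldir.toList ∨ (p.toList ++ ['/']) <+: reldir.toList := by
  simp only [mTest, Bool.or_eq_true, beq_iff_eq, PySem.Str.startswith_eq,
    PySem.Chars.startswith_iff, String.toList_append]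
  constructor
  · rintro (rfl | h)
    · exact Or.inl rfl
    · exact Or.inr (by simpa using h)
  · rintro (h | h)
    · exact Or.inl (String.toList_injective h).symm
    · exact Or.inr (by simpa using h)

theorem mbest_le (reldir : String) (m : List (String × String)) (X : Int)
    (hX : -1 ≤ X) (h : ∀ kv ∈ m, mTest reldir kv.1 = true → PySem.Str.len kv.1 ≤ X) :
    (mbest reldir m).2 ≤ X := by
  induction m with
  | nil => simpa [mbest] using hX
  | cons kv t ih =>
    have ht : (mbest reldir t).2 ≤ X := ih (fun x hx => h x (List.mem_cons_of_mem _ hx))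
    simp only [mbest]
    split
    · next hc =>
      simp only [Bool.and_eq_true, decide_eq_true_eq] at hc
      exact h kv (List.mem_cons_self) hc.1
    · exact ht

theorem mbest_neg (reldir : String) (m : List (String × String)) :
    (mbest reldir m).2 ≤ -1 → mbest reldir m = (none, -1) := by
  induction m with
  | nil => simp [mbest]
  | cons kv t ih =>
    simp only [mbest]
    split
    · intro h
      exact absurd h (by simp; have := len_nonneg kv.1; omega)
    · exact ih

-- A's foldl from an arbitrary state, reldir ≠ ""
theorem foldA (reldir : String) (hne : reldir ≠ "") (m : List (String × String)) :
    ∀ (o : Option String) (l : Int), -1 ≤ l →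
      m.foldl (matchAStep reldir) (o, l) =
        if l < (mbest reldir m).2 then mbest reldir m else (o, l) := by
  induction m with
  | nil =>
    intro o l hl
    simp only [List.foldl_nil, mbest]
    rw [if_neg (by omega)]
  | cons kv t ih =>
    intro o l hl
    have hr : (reldir == "") = false := by simp [hne]
    have hlen := len_nonneg kv.1
    simp only [List.foldl_cons, matchAStep, hr, Bool.and_false, Bool.false_eq_true, if_false,
      mbest]
    by_cases hc : (reldir == kv.1 || PySem.Str.startswith reldir (kv.1 ++ "/")) = true
    · have hm : mTest reldir kv.1 = true := hc
      rw [if_pos hc, hm]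
      simp only [Bool.true_and, decide_eq_true_eq]
      by_cases h1 : PySem.Str.len kv.1 > l
      · rw [if_pos h1, ih (some kv.2) (PySem.Str.len kv.1) (by omega)]
        split_ifs <;> first | rfl | omega
      · rw [if_neg h1, ih o l hl]
        split_ifs <;> first | rfl | omega
    · have hm : mTest reldir kv.1 = false := by simpa [mTest] using hc
      rw [if_neg hc, hm, ih o l hl]
      simp

theorem assocFirst_eq_none (m : List (String × String)) (c : String) :
    assocFirst m c = none ↔ ∀ kv ∈ m, kv.1 ≠ c := by
  induction m with
  | nil => simp [assocFirst]
  | cons kv t ih =>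
    simp only [assocFirst]
    split
    · next h => simp at h; simp [h]
    · next h => simp at h; simp [ih, h]

theorem mbest_found (reldir c : String) (v : String) (m : List (String × String))
    (hc : mTest reldir c = true)
    (hm : ∀ kv ∈ m, mTest reldir kv.1 = true → kv.1 = c ∨ PySem.Str.len kv.1 < PySem.Str.len c)
    (hf : assocFirst m c = some v) :
    mbest reldir m = (some v, PySem.Str.len c) := by
  induction m with
  | nil => simp [assocFirst] at hf
  | cons kv t ih =>
    simp only [assocFirst] at hf
    simp only [mbest]
    by_cases hk : kv.1 = c
    · rw [if_pos (by simpa using hk)] at hf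
      have hle : (mbest reldir t).2 ≤ PySem.Str.len c := by
        apply mbest_le _ _ _ (by have := len_nonneg c; omega)
        intro x hx hmx
        rcases hm x (List.mem_cons_of_mem _ hx) hmx with h | h
        · rw [h]
        · omega
      rw [if_pos (by simp [hk, hc]; simpa using hle)]
      simp only [Option.some.injEq] at hf
      rw [hk, hf]
    · rw [if_neg (by simpa using hk)] at hf
      have ht := ih (fun x hx => hm x (List.mem_cons_of_mem _ hx)) hf
      rw [ht]
      by_cases hmk : mTest reldir kv.1 = true
      · rcases hm kv (List.mem_cons_self) hmk with h | h
        · exact absurd h hk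
        · rw [if_neg (by
            simp only [hmk, Bool.true_and, decide_eq_true_eq]
            simp only [PySem.Str.len_eq] at h ⊢
            omega)]
      · rw [if_neg (by simp [hmk])]

-- spec device: first element of cs that has a binding in m (what bLoop computes along chain)
def tryCandidates (mapping : List (String × String)) : List String → Option String
  | [] => none
  | c :: cs =>
    match assocFirst mapping c with
    | some v => some v
    | none => tryCandidates mapping cs

theorem tryC (reldir : String) (cs : List String) (m : List (String × String))
    (hs : ∀ c ∈ cs, mTest reldir c = true)
    (hm : ∀ kv ∈ m, mTest reldir kv.1 = true → kv.1 ∈ cs)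
    (hd : cs.Pairwise (fun a b => PySem.Str.len b < PySem.Str.len a)) :
    tryCandidates m cs = (mbest reldir m).1 := by
  induction cs with
  | nil =>
    have : mbest reldir m = (none, -1) := by
      apply mbest_neg
      apply mbest_le _ _ _ (by omega)
      intro kv hkv hmk
      exact absurd (hm kv hkv hmk) (by simp)
    simp [tryCandidates, this]
  | cons c cs ih =>
    simp only [tryCandidates]
    cases hf : assocFirst m c with
    | some v =>
      rw [mbest_found reldir c v m (hs c List.mem_cons_self)
        (fun kv hkv hmk => by
          rcases List.mem_cons.mp (hm kv hkv hmk) with h | h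
          · exact Or.inl h
          · exact Or.inr ((List.pairwise_cons.mp hd).1 _ h))
        hf]
    | none =>
      rw [ih (fun x hx => hs x (List.mem_cons_of_mem _ hx))
        (fun kv hkv hmk => by
          rcases List.mem_cons.mp (hm kv hkv hmk) with h | h
          · exact absurd h ((assocFirst_eq_none m c).mp hf kv hkv)
          · exact h)
        (List.pairwise_cons.mp hd).2]

-- the chain of prefixes bLoop walks through, and its characterisation
def chain (c : String) : List String :=
  if h : PySem.Str.rfind c "/" < 0 then [c]
  else c :: chain (PySem.Str.slice c none (some (PySem.Str.rfind c "/")))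
termination_by c.toList.length
decreasing_by
  rw [toList_sliceI c _ (by omega), List.length_take]
  have := rfind_slash_lt c h
  omega

theorem bLoop_chain (m : List (String × String)) (c : String) :
    bLoop m c = tryCandidates m (chain c) := by
  induction c using chain.induct with
  | case1 c h =>
    rw [bLoop, chain, dif_pos h]
    cases hf : assocFirst m c with
    | none => simp only [tryCandidates, hf, dif_pos h]
    | some v => simp only [dif_pos h, tryCandidates, hf]
  | case2 c h ih =>
    rw [bLoop, chain, dif_neg h]
    cases hf : assocFirst m c with
    | none =>
      simp only [tryCandidates, hf, dif_neg h]
      exact ih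
    | some v => simp only [dif_neg h, tryCandidates, hf]

theorem slash_at_iff (l : List Char) (m : Nat) :
    (['/'].isPrefixOf (l.drop m)) = true ↔ l[m]? = some '/' := by
  rw [List.isPrefixOf_iff_prefix]
  cases hd : l.drop m with
  | nil =>
    have : l[m]? = none := by
      have := congrArg List.length hd
      simp only [List.length_drop, List.length_nil] at this
      exact List.getElem?_eq_none (by omega)
    simp [this]
  | cons x t =>
    have hx : l[m]? = some x := by
      have := List.getElem?_drop (xs := l) (i := m) (j := 0)
      rw [hd] at this
      simpa using this.symm
    simp [List.cons_prefix_cons, hx, eq_comm]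

theorem len_sliceB (s : String) (i : Int) (h : 0 ≤ i) :
    PySem.Str.len (PySem.Str.slice s none (some i)) = ↑(min i.toNat s.toList.length) := by
  rw [PySem.Str.len_eq, toList_sliceI s i h, List.length_take]

theorem rfind_go_ge (s sub : List Char) (j m : Nat) (hm : m ≤ j)
    (hp : sub.isPrefixOf (s.drop m) = true) :
    (m : Int) ≤ PySem.Chars.rfind.go s sub j := by
  induction j with
  | zero =>
    have h0 : m = 0 := by omega
    subst h0
    simp only [List.drop_zero] at hp
    simp [PySem.Chars.rfind.go, hp]
  | succ j ih =>
    by_cases h : sub.isPrefixOf (s.drop (j + 1)) = true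
    · have he : PySem.Chars.rfind.go s sub (j + 1) = ((j : Int) + 1) := by
        simp [PySem.Chars.rfind.go, h]
      rw [he]
      omega
    · by_cases hmj : m ≤ j
      · rw [show PySem.Chars.rfind.go s sub (j + 1) = PySem.Chars.rfind.go s sub j from by
          simp [PySem.Chars.rfind.go, h]]
        exact ih hmj
      · have h1 : m = j + 1 := by omega
        subst h1
        exact absurd hp h

-- facts about i = c.rfind("/") when it is ≥ 0
theorem rfind_slash_at (c : String) (h : ¬ PySem.Str.rfind c "/" < 0) :
    c.toList[(PySem.Str.rfind c "/").toNat]? = some '/' := by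
  rw [← slash_at_iff]
  rw [rfind_slash_eq] at h ⊢
  rcases rfind_go_bounds c.toList ['/'] c.toList.length with h' | ⟨_, _, h3⟩
  · omega
  · exact h3

theorem rfind_slash_max (c : String) (m : Nat) (hm : c.toList[m]? = some '/') :
    (m : Int) ≤ PySem.Str.rfind c "/" := by
  rw [rfind_slash_eq]
  have hlt : m < c.toList.length := by
    rcases Nat.lt_or_ge m c.toList.length with h' | h'
    · exact h'
    · rw [List.getElem?_eq_none h'] at hm
      cases hm
  exact rfind_go_ge _ _ _ _ (by omega) ((slash_at_iff _ _).mpr hm)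

theorem take_slash_prefix (l : List Char) (j : Nat) (h : l[j]? = some '/') :
    l.take j ++ ['/'] <+: l := by
  obtain ⟨hj, hget⟩ := List.getElem?_eq_some_iff.mp h
  refine ⟨l.drop (j + 1), ?_⟩
  conv_rhs => rw [← List.take_append_drop j l, List.drop_eq_getElem_cons hj, hget]
  simp

theorem prefix_slash_at (u l : List Char) (h : u ++ ['/'] <+: l) :
    l[u.length]? = some '/' ∧ u.length < l.length ∧ l.take u.length = u := by
  obtain ⟨t, ht⟩ := h
  refine ⟨?_, ?_, ?_⟩
  · rw [← ht, List.append_assoc, List.getElem?_append_right (le_refl _)]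
    simp
  · have := congrArg List.length ht
    simp only [List.length_append, List.length_cons, List.length_nil] at this
    omega
  · rw [← ht, List.append_assoc, List.take_left]

theorem mTest_sub (reldir c : String) (hc : mTest reldir c = true) :
    c.toList <+: reldir.toList := by
  rw [mTest_iff] at hc
  rcases hc with hc | hc
  · exact hc ▸ List.prefix_refl _
  · exact (List.prefix_append c.toList ['/']).trans hc

theorem chain_mTest (reldir : String) (c : String) (hc : mTest reldir c = true) :
    ∀ x ∈ chain c, mTest reldir x = true := by
  induction c using chain.induct with
  | case1 c h =>
    intro x hx
    rw [chain.eq_def, dif_pos h] at hx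
    simp only [List.mem_singleton] at hx
    exact hx ▸ hc
  | case2 c h ih =>
    intro x hx
    rw [chain.eq_def, dif_neg h] at hx
    rcases List.mem_cons.mp hx with rfl | hx
    · exact hc
    · refine ih ?_ x hx
      rw [mTest_iff, toList_sliceI c _ (by omega)]
      right
      exact (take_slash_prefix c.toList _ (rfind_slash_at c h)).trans (mTest_sub reldir c hc)

theorem chain_complete (c : String) (p : String)
    (hp : p.toList = c.toList ∨ p.toList ++ ['/'] <+: c.toList) :
    p ∈ chain c := by
  induction c using chain.induct with
  | case1 c h =>
    rw [chain.eq_def, dif_pos h]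
    rcases hp with hp | hp
    · simp [String.toList_injective hp]
    · exfalso
      obtain ⟨hs, _, _⟩ := prefix_slash_at _ _ hp
      have := rfind_slash_max c _ hs
      omega
  | case2 c h ih =>
    rw [chain.eq_def, dif_neg h]
    rcases hp with hp | hp
    · simp [String.toList_injective hp]
    · obtain ⟨hs, hlt, htake⟩ := prefix_slash_at _ _ hp
      have hge := rfind_slash_max c _ hs
      right
      apply ih
      rw [toList_sliceI c _ (by omega)]
      rcases Nat.lt_or_ge p.toList.length (PySem.Str.rfind c "/").toNat with hcase | hcase
      · right
        rw [List.prefix_take_iff]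
        refine ⟨hp, by simp only [List.length_append, List.length_cons, List.length_nil]; omega⟩
      · left
        have : p.toList.length = (PySem.Str.rfind c "/").toNat := by omega
        rw [← this, htake]

theorem chain_len_le (c : String) : ∀ x ∈ chain c, PySem.Str.len x ≤ PySem.Str.len c := by
  induction c using chain.induct with
  | case1 c h =>
    intro x hx
    rw [chain.eq_def, dif_pos h] at hx
    simp only [List.mem_singleton] at hx
    exact hx ▸ le_refl _
  | case2 c h ih =>
    intro x hx
    rw [chain.eq_def, dif_neg h] at hx
    rcases List.mem_cons.mp hx with rfl | hx
    · exact le_refl _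
    · have := ih x hx
      have hlt := rfind_slash_lt c h
      rw [len_sliceB _ _ (by omega)] at this
      simp only [PySem.Str.len_eq] at this ⊢
      omega

theorem chain_pairwise (c : String) :
    (chain c).Pairwise (fun a b => PySem.Str.len b < PySem.Str.len a) := by
  induction c using chain.induct with
  | case1 c h =>
    rw [chain.eq_def, dif_pos h]
    simp
  | case2 c h ih =>
    rw [chain.eq_def, dif_neg h]
    rw [List.pairwise_cons]
    refine ⟨?_, ih⟩
    intro b hb
    have h1 := chain_len_le _ b hb
    have hlt := rfind_slash_lt c h
    rw [len_sliceB _ _ (by omega)] at h1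
    simp only [PySem.Str.len_eq] at h1 ⊢
    omega

-- the empty-reldir case
theorem foldA_empty_fixed (m : List (String × String)) (v : String) :
    m.foldl (matchAStep "") (some v, 0) = (some v, 0) := by
  induction m with
  | nil => rfl
  | cons kv t ih =>
    have hstep : matchAStep "" (some v, 0) kv = (some v, 0) := by
      simp only [matchAStep]
      split
      · next h =>
        have h' : mTest "" kv.1 = true := h
        rw [mTest_iff] at h'
        have hk : kv.1 = "" := by
          rcases h' with h' | h'
          · exact String.toList_injective h'
          · exact absurd (List.IsPrefix.length_le h') (by simp)
        rw [if_neg (by rw [hk]; decide)]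
      · split
        · rw [if_neg (by decide)]
        · rfl
    rw [List.foldl_cons, hstep, ih]

theorem mTest_empty_false (k : String) (h0 : k ≠ "") : mTest "" k = false := by
  rw [Bool.eq_false_iff]
  intro hb
  rw [mTest_iff] at hb
  rcases hb with hb | hb
  · exact h0 (String.toList_injective hb)
  · exact absurd (List.IsPrefix.length_le hb) (by simp)

theorem foldA_empty (m : List (String × String)) :
    (m.foldl (matchAStep "") (none, -1)).1 = rootLookup m := by
  induction m with
  | nil => rfl
  | cons kv t ih =>
    obtain ⟨k1, k2⟩ := kv
    simp only [List.foldl_cons, rootLookup]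
    by_cases h0 : k1 = ""
    · subst h0
      have hstep : matchAStep "" (none, -1) ("", k2) = (some k2, 0) := by
        simp only [matchAStep]
        rw [if_pos (by decide), if_pos (by decide),
          show PySem.Str.len "" = 0 from by decide]
      rw [hstep, foldA_empty_fixed, if_pos (by decide)]
    · have hc := mTest_empty_false k1 h0
      by_cases hdot : k1 = "."
      · subst hdot
        have hstep : matchAStep "" (none, -1) (".", k2) = (some k2, 0) := by
          simp only [matchAStep]
          rw [if_neg (by decide), if_pos (by decide), if_pos (by decide)]
        rw [hstep, foldA_empty_fixed, if_pos (by decide)]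
      · have hstep : matchAStep "" (none, -1) (k1, k2) = (none, -1) := by
          simp only [matchAStep]
          rw [if_neg (by show ¬(mTest "" k1 = true); simp [hc]),
            if_neg (by simp [hdot])]
        rw [hstep, ih, if_neg (by simp [h0, hdot])]

-- ===== VERDICT (by name: the statement is the Claim_ definition above) =====
theorem match_dir_prefix_spec : Claim_equal_match_dir_prefix := by
  intro reldir mapping _
  unfold Spec_match_dir_prefix match_dir_prefix match_dir_prefix_alt
  by_cases hne : reldir = ""
  · subst hne
    rw [if_pos (by simp)]
    exact foldA_empty mapping
  · rw [if_neg (by simpa using hne)]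
    rw [foldA reldir hne mapping none (-1) (by omega)]
    rw [bLoop_chain mapping reldir]
    rw [tryC reldir (chain reldir) mapping
      (chain_mTest reldir reldir (by rw [mTest_iff]; exact Or.inl rfl))
      (fun kv _ hmk => chain_complete reldir kv.1 (by rwa [mTest_iff] at hmk))
      (chain_pairwise reldir)]
    rcases le_or_gt (mbest reldir mapping).2 (-1) with h | h
    · rw [if_neg (by omega), mbest_neg reldir mapping h]
    · rw [if_pos (by omega)]
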